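-- pv_equiv track=rewrite | github.com/alvarodiez20/linkedin_games | linkedin_games/queens/solver.py | _adjacent_conflict
-- ===== SOURCE A (Python) =====
-- def _adjacent_conflict(row: int, col: int, positions: list[tuple[int, int] | None]) -> bool:
--     """Return ``True`` if placing a queen at ``(row, col)`` is adjacent to any
--     already-placed queen (8-directional neighbourhood, i.e. touching corners counts).
--
--     Args:
--         row: Candidate row.
--         col: Candidate column.
--         positions: Current partial solution.
--
--     Returns:
--         ``True`` if the placement would create an adjacency conflict.
--     """
--     for pos in positions:
--         if pos is None:
--             continue
--         pr, pc = pos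
--         if abs(pr - row) <= 1 and abs(pc - col) <= 1:
--             return True
--     return False
-- ===== SOURCE B (Python) =====
-- def _adjacent_conflict(row: int, col: int, positions: list) -> bool:
--     placed = {pos for pos in positions if pos is not None}
--     for dr in (-1, 0, 1):
--         for dc in (-1, 0, 1):
--             if (row + dr, col + dc) in placed:
--                 return True
--     return False
-- ===== Notes on version B (the rewrite author's own statement) =====
-- stated objective: alternative
-- what changed: Instead of scanning every placed queen and testing Chebyshev distance, B builds a set of placed coordinates once and probes the fixed 3x3 neighbourhood of (row,col) by set membership.
import Mathlib
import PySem

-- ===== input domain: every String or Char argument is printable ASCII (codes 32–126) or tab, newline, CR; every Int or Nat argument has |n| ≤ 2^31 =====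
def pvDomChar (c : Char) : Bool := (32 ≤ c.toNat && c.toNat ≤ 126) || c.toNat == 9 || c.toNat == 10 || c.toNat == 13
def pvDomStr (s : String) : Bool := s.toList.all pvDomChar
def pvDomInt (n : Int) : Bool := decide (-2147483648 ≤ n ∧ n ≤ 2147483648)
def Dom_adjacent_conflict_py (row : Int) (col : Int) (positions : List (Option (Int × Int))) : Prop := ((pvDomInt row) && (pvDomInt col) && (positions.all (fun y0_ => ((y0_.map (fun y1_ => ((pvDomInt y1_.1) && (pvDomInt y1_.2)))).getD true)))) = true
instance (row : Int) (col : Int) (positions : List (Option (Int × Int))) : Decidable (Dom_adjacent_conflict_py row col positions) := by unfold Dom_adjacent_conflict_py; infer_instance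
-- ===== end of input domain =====

-- B builds the set of placed coordinates once and probes the fixed 3x3 neighbourhood
-- by set membership, instead of A's scan over all placed queens testing Chebyshev distance.

-- ===== PORT A =====
-- literal port of A's loop: skip None, return True on the first queen within distance 1
def adjacent_conflict_py (row : Int) (col : Int) (positions : List (Option (Int × Int))) : Bool :=
  match positions with
  | [] => false
  | none :: rest => adjacent_conflict_py row col rest
  | some (pr, pc) :: rest =>
    if (pr - row).natAbs ≤ 1 ∧ (pc - col).natAbs ≤ 1 then true
    else adjacent_conflict_py row col rest

-- ===== PORT B =====
-- the set comprehension {pos for pos in positions if pos is not None}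
def pvPlacedSet (positions : List (Option (Int × Int))) : PySem.Set (Int × Int) :=
  positions.foldl (fun s p => match p with | none => s | some q => PySem.Set.add s q) PySem.Set.empty

def adjacent_conflict_py_alt (row : Int) (col : Int) (positions : List (Option (Int × Int))) : Bool :=
  let placed := pvPlacedSet positions
  ([-1, 0, 1] : List Int).any (fun dr =>
    ([-1, 0, 1] : List Int).any (fun dc =>
      PySem.Set.contains placed (row + dr, col + dc)))

-- ===== PRECONDITION & SPEC =====
def Spec_adjacent_conflict_py (row : Int) (col : Int) (positions : List (Option (Int × Int))) (out : Bool) : Prop := out = adjacent_conflict_py_alt row col positions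
instance (row : Int) (col : Int) (positions : List (Option (Int × Int))) (out : Bool) : Decidable (Spec_adjacent_conflict_py row col positions out) := by unfold Spec_adjacent_conflict_py; infer_instance

-- ===== CLAIM (what is proved, stated in full; the proofs are below) =====
def Claim_equal_adjacent_conflict_py : Prop := ∀ (row : Int) (col : Int) (positions : List (Option (Int × Int))), Dom_adjacent_conflict_py row col positions → Spec_adjacent_conflict_py row col positions (adjacent_conflict_py row col positions)

-- ===== LEMMAS AND PROOFS =====

theorem mem_pvPlacedSet (positions : List (Option (Int × Int))) (q : Int × Int) :
    q ∈ pvPlacedSet positions ↔ some q ∈ positions := by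
  suffices h : ∀ (s : PySem.Set (Int × Int)),
      q ∈ positions.foldl (fun s p => match p with | none => s | some q => PySem.Set.add s q) s ↔
        q ∈ s ∨ some q ∈ positions by
    simpa [pvPlacedSet, PySem.Set.empty] using h []
  induction positions with
  | nil => simp
  | cons p rest ih =>
    intro s
    cases p with
    | none => simp [List.foldl_cons, ih]
    | some r =>
      simp only [List.foldl_cons, ih, PySem.Set.mem_add, List.mem_cons, Option.some.injEq]
      tauto

theorem A_eq_true_iff (row col : Int) (positions : List (Option (Int × Int))) :
    adjacent_conflict_py row col positions = true ↔
      ∃ pr pc, some (pr, pc) ∈ positions ∧ (pr - row).natAbs ≤ 1 ∧ (pc - col).natAbs ≤ 1 := by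
  induction positions with
  | nil => simp [adjacent_conflict_py]
  | cons p rest ih =>
    cases p with
    | none => simp [adjacent_conflict_py, ih]
    | some r =>
      obtain ⟨pr, pc⟩ := r
      by_cases h : (pr - row).natAbs ≤ 1 ∧ (pc - col).natAbs ≤ 1
      · constructor
        · intro _; exact ⟨pr, pc, by simp, h⟩
        · intro _; simp [adjacent_conflict_py, h]
      · simp only [adjacent_conflict_py, if_neg h, ih]
        constructor
        · rintro ⟨a, b, hm, hb⟩; exact ⟨a, b, by simp [hm], hb⟩
        · rintro ⟨a, b, hm, hb⟩
          rcases List.mem_cons.mp hm with heq | hm'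
          · exact absurd (by cases heq; exact hb) h
          · exact ⟨a, b, hm', hb⟩

theorem B_eq_true_iff (row col : Int) (positions : List (Option (Int × Int))) :
    adjacent_conflict_py_alt row col positions = true ↔
      ∃ dr ∈ ([-1, 0, 1] : List Int), ∃ dc ∈ ([-1, 0, 1] : List Int),
        some (row + dr, col + dc) ∈ positions := by
  simp [adjacent_conflict_py_alt, mem_pvPlacedSet]

-- ===== VERDICT (by name: the statement is the Claim_ definition above) =====
theorem adjacent_conflict_py_spec : Claim_equal_adjacent_conflict_py := by
  intro row col positions _
  unfold Spec_adjacent_conflict_py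
  rcases hA : adjacent_conflict_py row col positions with _ | _
  · rcases hB : adjacent_conflict_py_alt row col positions with _ | _
    · rfl
    · exfalso
      obtain ⟨dr, hdr, dc, hdc, hm⟩ := (B_eq_true_iff row col positions).mp hB
      have : adjacent_conflict_py row col positions = true := by
        refine (A_eq_true_iff row col positions).mpr ⟨row + dr, col + dc, hm, ?_⟩
        simp at hdr hdc
        rcases hdr with h|h|h <;> rcases hdc with h'|h'|h' <;> constructor <;> omega
      simp [this] at hA
  · obtain ⟨pr, pc, hm, h1, h2⟩ := (A_eq_true_iff row col positions).mp hA
    symm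
    refine (B_eq_true_iff row col positions).mpr ⟨pr - row, ?_, pc - col, ?_, ?_⟩
    · simp; omega
    · simp; omega
    · simpa using hm
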